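-- pv_equiv track=rewrite | github.com/bhavink/databricks | connectors/pipelines/healthcare_ingestion/transformations/bronze_hl7v2.py | split_hl7_batch
-- ===== SOURCE A (Python) =====
-- def split_hl7_batch(text: str):
--     """Split batch file into individual HL7v2 messages."""
--     if not text:
--         return []
--     text = text.replace("\r\n", "\n").replace("\r", "\n")
--     messages, current = [], []
--     for line in text.split("\n"):
--         line = line.strip()
--         if not line:
--             continue
--         if line.startswith("MSH"):
--             if current:
--                 messages.append("\n".join(current))
--             current = [line]
--         else:
--             current.append(line)
--     if current:
--         messages.append("\n".join(current))
--     return messages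
-- ===== SOURCE B (Python) =====
-- def split_hl7_batch(text: str):
--     """Split batch file into individual HL7v2 messages."""
--     cleaned = [s for s in (l.strip() for l in
--                text.replace("\r\n", "\n").replace("\r", "\n").split("\n")) if s]
--     out = []
--     rest = cleaned
--     while rest:
--         head, rest = rest[0], rest[1:]
--         body = []
--         while rest and not rest[0].startswith("MSH"):
--             body.append(rest[0])
--             rest = rest[1:]
--         out.append("\n".join([head] + body))
--     return out
-- ===== Notes on version B (the rewrite author's own statement) =====
-- stated objective: alternative
-- what changed: B first builds the cleaned list of non-empty stripped lines, then partitions it by scanning for the next MSH boundary (head + span of non-MSH lines per message), instead of A's single streaming scan with a flush-on-MSH accumulator.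
import Mathlib
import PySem

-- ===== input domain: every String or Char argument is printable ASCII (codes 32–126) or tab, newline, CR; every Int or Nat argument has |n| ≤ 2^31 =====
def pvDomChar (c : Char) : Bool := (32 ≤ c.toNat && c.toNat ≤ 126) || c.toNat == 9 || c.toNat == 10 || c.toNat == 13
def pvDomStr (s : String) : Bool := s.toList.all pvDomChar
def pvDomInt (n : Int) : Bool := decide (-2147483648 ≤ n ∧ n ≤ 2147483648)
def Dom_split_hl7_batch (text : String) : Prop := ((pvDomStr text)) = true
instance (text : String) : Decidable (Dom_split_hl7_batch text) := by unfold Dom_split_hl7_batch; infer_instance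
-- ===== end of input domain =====

-- B partitions the pre-cleaned line list by scanning to the next MSH boundary instead of
-- A's streaming accumulate-and-flush scan (objective: alternative decomposition, same cost).

-- ===== PORT A =====
def split_hl7_batch (text : String) : List String :=
  if text = "" then []
  else
    let t := PySem.Str.replace (PySem.Str.replace text "\r\n" "\n") "\r" "\n"
    let st := ((PySem.Str.split? t "\n").getD []).foldl
      (fun (st : List String × List String) line =>
        let l := PySem.Str.strip line
        if l = "" then st
        else if PySem.Str.startswith l "MSH" then
          ((if st.2 ≠ [] then st.1 ++ [PySem.Str.join "\n" st.2] else st.1), [l])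
        else (st.1, st.2 ++ [l])) ([], [])
    if st.2 ≠ [] then st.1 ++ [PySem.Str.join "\n" st.2] else st.1

-- ===== PORT B =====
-- inner while loop of Source B: take the span of non-MSH lines after the head, recurse on the rest
def pvChunks : List String → List String
  | [] => []
  | h :: rest =>
    PySem.Str.join "\n" (h :: rest.takeWhile (fun s => !PySem.Str.startswith s "MSH"))
      :: pvChunks (rest.dropWhile (fun s => !PySem.Str.startswith s "MSH"))
termination_by l => l.length
decreasing_by
  simp only [List.length_cons]
  exact Nat.lt_succ_of_le (List.length_dropWhile_le _ _)

def split_hl7_batch_alt (text : String) : List String :=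
  let t := PySem.Str.replace (PySem.Str.replace text "\r\n" "\n") "\r" "\n"
  let cleaned := ((PySem.Str.split? t "\n").getD []).filterMap (fun l =>
    let s := PySem.Str.strip l
    if s = "" then none else some s)
  pvChunks cleaned

-- ===== PRECONDITION & SPEC =====
def Spec_split_hl7_batch (text : String) (out : List String) : Prop := out = split_hl7_batch_alt text
instance (text : String) (out : List String) : Decidable (Spec_split_hl7_batch text out) := by unfold Spec_split_hl7_batch; infer_instance

-- ===== CLAIM (what is proved, stated in full; the proofs are below) =====
def Claim_equal_split_hl7_batch : Prop := ∀ (text : String), Dom_split_hl7_batch text → Spec_split_hl7_batch text (split_hl7_batch text)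

-- ===== LEMMAS AND PROOFS =====

def pvStepA (st : List String × List String) (line : String) : List String × List String :=
  let l := PySem.Str.strip line
  if l = "" then st
  else if PySem.Str.startswith l "MSH" then
    ((if st.2 ≠ [] then st.1 ++ [PySem.Str.join "\n" st.2] else st.1), [l])
  else (st.1, st.2 ++ [l])

def pvFinish (st : List String × List String) : List String :=
  if st.2 ≠ [] then st.1 ++ [PySem.Str.join "\n" st.2] else st.1

def pvClean (lines : List String) : List String :=
  lines.filterMap (fun l =>
    let s := PySem.Str.strip l
    if s = "" then none else some s)

lemma pvMSH : ("MSH".toList : List Char) = ['M','S','H'] := rfl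

lemma pvFold_ne (lines : List String) : ∀ (msgs cur : List String), cur ≠ [] →
    pvFinish (lines.foldl pvStepA (msgs, cur)) =
      msgs ++ (PySem.Str.join "\n"
          (cur ++ (pvClean lines).takeWhile (fun s => !PySem.Str.startswith s "MSH"))
        :: pvChunks ((pvClean lines).dropWhile (fun s => !PySem.Str.startswith s "MSH"))) := by
  induction lines with
  | nil => intro msgs cur h; simp [pvFinish, pvClean, pvChunks, h]
  | cons l rest ih =>
    intro msgs cur h
    by_cases hs : PySem.Str.strip l = ""
    · simpa [pvStepA, pvClean, hs] using ih msgs cur h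
    · by_cases hm : PySem.Str.startswith (PySem.Str.strip l) "MSH"
      · simp only [PySem.Str.startswith_eq, PySem.Str.toList_strip, pvMSH] at hm
        have key := ih (msgs ++ [PySem.Str.join "\n" cur]) [PySem.Str.strip l] (by simp)
        simp [pvStepA, pvClean, pvMSH, hs, h] at key ⊢
        simp only [List.takeWhile_cons, List.dropWhile_cons, hm]
        simp [pvChunks, hm, key]
      · simp only [PySem.Str.startswith_eq, PySem.Str.toList_strip, pvMSH] at hm
        have key := ih msgs (cur ++ [PySem.Str.strip l]) (by simp)
        simp [pvStepA, pvClean, pvMSH, hs] at key ⊢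
        simp [hm, key]

lemma pvFold_nil (lines : List String) : ∀ (msgs : List String),
    pvFinish (lines.foldl pvStepA (msgs, [])) = msgs ++ pvChunks (pvClean lines) := by
  induction lines with
  | nil => intro msgs; simp [pvFinish, pvClean, pvChunks]
  | cons l rest ih =>
    intro msgs
    by_cases hs : PySem.Str.strip l = ""
    · simpa [pvStepA, pvClean, hs] using ih msgs
    · have key := pvFold_ne rest msgs [PySem.Str.strip l] (by simp)
      by_cases hm : PySem.Str.startswith (PySem.Str.strip l) "MSH"
      · simp [pvStepA, pvClean, pvChunks, pvMSH, hs] at key ⊢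
        simp [key]
      · simp [pvStepA, pvClean, pvChunks, pvMSH, hs] at key ⊢
        simp [key]

-- ===== VERDICT (by name: the statement is the Claim_ definition above) =====
theorem split_hl7_batch_spec : Claim_equal_split_hl7_batch := by
  intro text _
  unfold Spec_split_hl7_batch split_hl7_batch split_hl7_batch_alt
  by_cases h : text = ""
  · subst h
    have hc : (((PySem.Str.split? (PySem.Str.replace (PySem.Str.replace "" "\r\n" "\n")
        "\r" "\n") "\n").getD []).filterMap (fun l =>
          let s := PySem.Str.strip l
          if s = "" then none else some s)) = ([] : List String) := by decide
    simp only [reduceIte]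
    rw [hc]
    simp [pvChunks]
  · rw [if_neg h]
    exact pvFold_nil ((PySem.Str.split?
      (PySem.Str.replace (PySem.Str.replace text "\r\n" "\n") "\r" "\n") "\n").getD []) []
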